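-- pv_equiv track=rewrite | github.com/yuhaozheng0/SiteSync_tools | SiteSync_tools_ui.py | _diff_segments
-- ===== SOURCE A (Python) =====
-- import difflib
--
-- def _diff_segments(a: str, b: str):
--     """
--     字符级 diff，返回 (a_segs, b_segs)。
--     每段为 (text, is_changed)：is_changed=True 表示该段是差异部分。
--     """
--     matcher = difflib.SequenceMatcher(None, a, b, autojunk=False)
--     a_segs: list[tuple[str, bool]] = []
--     b_segs: list[tuple[str, bool]] = []
--     for tag, i1, i2, j1, j2 in matcher.get_opcodes():
--         if tag == "equal":
--             a_segs.append((a[i1:i2], False))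
--             b_segs.append((b[j1:j2], False))
--         elif tag == "replace":
--             a_segs.append((a[i1:i2], True))
--             b_segs.append((b[j1:j2], True))
--         elif tag == "delete":
--             a_segs.append((a[i1:i2], True))
--         elif tag == "insert":
--             b_segs.append((b[j1:j2], True))
--     return a_segs, b_segs
-- ===== SOURCE B (Python) =====
-- def _longest_match(a, b, alo, ahi, blo, bhi):
--     """Longest matching block of a[alo:ahi] / b[blo:bhi] via a dense
--     suffix-length table over the window, then extended to be maximal."""
--     width = bhi - blo
--     best_i, best_j, best_size = alo, blo, 0
--     prev = [0] * (width + 1)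
--     for i in range(alo, ahi):
--         cur = [0] * (width + 1)
--         for t in range(1, width + 1):
--             if a[i] == b[blo + t - 1]:
--                 k = prev[t - 1] + 1
--                 cur[t] = k
--                 if k > best_size:
--                     best_i, best_j, best_size = i - k + 1, blo + t - k, k
--         prev = cur
--     while best_i > alo and best_j > blo and a[best_i - 1] == b[best_j - 1]:
--         best_i, best_j, best_size = best_i - 1, best_j - 1, best_size + 1
--     while (best_i + best_size < ahi and best_j + best_size < bhi
--            and a[best_i + best_size] == b[best_j + best_size]):
--         best_size += 1
--     return best_i, best_j, best_size
--
--
-- def _blocks(a, b, alo, ahi, blo, bhi, out):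
--     """Append the matching blocks of the window to out, left to right."""
--     i, j, k = _longest_match(a, b, alo, ahi, blo, bhi)
--     if k:
--         if alo < i and blo < j:
--             _blocks(a, b, alo, i, blo, j, out)
--         out.append((i, j, k))
--         if i + k < ahi and j + k < bhi:
--             _blocks(a, b, i + k, ahi, j + k, bhi, out)
--
--
-- def _merged_blocks(a, b):
--     raw = []
--     _blocks(a, b, 0, len(a), 0, len(b), raw)
--     merged = []
--     for i2, j2, k2 in raw:
--         if merged and merged[-1][0] + merged[-1][2] == i2 \
--                 and merged[-1][1] + merged[-1][2] == j2:
--             i1, j1, k1 = merged.pop()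
--             merged.append((i1, j1, k1 + k2))
--         else:
--             merged.append((i2, j2, k2))
--     return merged
--
--
-- def _segments_along(s, spans):
--     """Rebuild one string's segmentation from its matched (start, size) spans:
--     matched spans become unchanged segments, the gaps between them changed ones."""
--     segs = []
--     pos = 0
--     for start, size in spans:
--         if pos < start:
--             segs.append((s[pos:start], True))
--         segs.append((s[start:start + size], False))
--         pos = start + size
--     if pos < len(s):
--         segs.append((s[pos:], True))
--     return segs
--
--
-- def _diff_segments(a: str, b: str):
--     blocks = _merged_blocks(a, b)
--     return (_segments_along(a, [(i, size) for i, _, size in blocks]),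
--             _segments_along(b, [(j, size) for _, j, size in blocks]))
-- ===== Notes on version B (the rewrite author's own statement) =====
-- stated objective: alternative
-- what changed: B computes the matching blocks with a dense per-row suffix-length table over the window (classic longest-common-substring matrix) instead of difflib's char-indexed b2j dictionary DP, collects blocks by direct in-order recursion (no explicit stack, no sort pass), merges adjacent blocks with a peek-at-last fold, and finally rebuilds each string's segmentation independently from its matched spans instead of walking tagged opcodes.
import Mathlib
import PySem

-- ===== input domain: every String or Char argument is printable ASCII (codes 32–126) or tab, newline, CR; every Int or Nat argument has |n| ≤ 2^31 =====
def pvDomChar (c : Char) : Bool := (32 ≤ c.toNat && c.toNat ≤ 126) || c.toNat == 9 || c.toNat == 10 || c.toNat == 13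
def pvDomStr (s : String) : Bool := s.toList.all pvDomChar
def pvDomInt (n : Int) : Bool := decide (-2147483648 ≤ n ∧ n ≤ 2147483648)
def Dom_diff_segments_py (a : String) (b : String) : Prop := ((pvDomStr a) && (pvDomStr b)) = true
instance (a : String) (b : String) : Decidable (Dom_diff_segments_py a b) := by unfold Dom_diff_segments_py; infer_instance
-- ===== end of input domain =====

-- B finds matching blocks with a dense per-row suffix-length table (no char-index
-- dictionary), collects them by in-order recursion (no stack, no sort), merges with a
-- peek-at-last fold and rebuilds each string's segments independently from its matched
-- spans instead of walking tagged opcodes (objective: alternative); return value only.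

-- ===== PORT A =====
-- A calls difflib.SequenceMatcher(None, a, b, autojunk=False); this block is the
-- step-for-step transcription of that library matcher as CPython implements it
-- (b2j index, find_longest_match, stack loop, sort, merge), then of A's own loop.

-- b2j = {}; for i, elt in enumerate(b): b2j.setdefault(elt, []).append(i)
def pvB2J (bs : List Char) : PySem.Dict Char (List Int) :=
  (PySem.List.enumerate bs).foldl
    (fun d p => PySem.Dict.modify d p.2 [] (fun l => l ++ [p.1])) PySem.Dict.empty

-- inner loop of find_longest_match over b2j.get(a[i], []) with continue/break
def pvFlmInner (j2len : PySem.Dict Int Int) (blo bhi i : Int) :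
    List Int → PySem.Dict Int Int → Int × Int × Int → PySem.Dict Int Int × (Int × Int × Int)
  | [], nj, best => (nj, best)
  | j :: rest, nj, best =>
    if j < blo then pvFlmInner j2len blo bhi i rest nj best
    else if bhi ≤ j then (nj, best)
    else
      let k := PySem.Dict.getD j2len (j - 1) 0 + 1
      let nj' := PySem.Dict.insert nj j k
      let best' := if best.2.2 < k then (i - k + 1, j - k + 1, k) else best
      pvFlmInner j2len blo bhi i rest nj' best'

-- while besti > alo and bestj > blo and a[besti-1] == b[bestj-1]: extend left
-- (shared with port B, whose Python has the identical while loop)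
def pvExtL (as_ bs : List Char) (alo blo : Int) :
    Nat → Int × Int × Int → Int × Int × Int
  | 0, best => best
  | n + 1, (bi, bj, sz) =>
    if alo < bi ∧ blo < bj ∧
        PySem.List.pyGetD as_ (bi - 1) ' ' = PySem.List.pyGetD bs (bj - 1) ' ' then
      pvExtL as_ bs alo blo n (bi - 1, bj - 1, sz + 1)
    else (bi, bj, sz)

-- while besti+bestsize < ahi and bestj+bestsize < bhi and a[..] == b[..]: bestsize += 1
-- (shared with port B likewise)
def pvExtR (as_ bs : List Char) (ahi bhi : Int) :
    Nat → Int × Int × Int → Int × Int × Int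
  | 0, best => best
  | n + 1, (bi, bj, sz) =>
    if bi + sz < ahi ∧ bj + sz < bhi ∧
        PySem.List.pyGetD as_ (bi + sz) ' ' = PySem.List.pyGetD bs (bj + sz) ' ' then
      pvExtR as_ bs ahi bhi n (bi, bj, sz + 1)
    else (bi, bj, sz)

-- find_longest_match(alo, ahi, blo, bhi); the junk/popular sets are empty here
def pvFLM (as_ bs : List Char) (b2j : PySem.Dict Char (List Int))
    (alo ahi blo bhi : Int) : Int × Int × Int :=
  let st := (PySem.List.pyRange alo ahi 1).foldl
    (fun (st : PySem.Dict Int Int × (Int × Int × Int)) i =>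
      pvFlmInner st.1 blo bhi i
        (PySem.Dict.getD b2j (PySem.List.pyGetD as_ i ' ') [])
        PySem.Dict.empty st.2)
    (PySem.Dict.empty, (alo, blo, 0))
  let b1 := pvExtL as_ bs alo blo (st.2.1 - alo).toNat st.2
  pvExtR as_ bs ahi bhi (ahi - (b1.1 + b1.2.2)).toNat b1

-- the while-queue of get_matching_blocks; head of the list is the top of Python's stack
-- (queue.pop() pops the last-pushed region); fuel bounds the number of pops, which is
-- at most 2*min(len(a),len(b))+1 since each found block consumes at least one char of each
def pvQueueLoop (as_ bs : List Char) (b2j : PySem.Dict Char (List Int)) :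
    Nat → List (Int × Int × Int × Int) → List (Int × Int × Int) → List (Int × Int × Int)
  | 0, _, acc => acc
  | _ + 1, [], acc => acc
  | n + 1, (alo, ahi, blo, bhi) :: rest, acc =>
    let x := pvFLM as_ bs b2j alo ahi blo bhi
    let i := x.1; let j := x.2.1; let k := x.2.2
    if k ≠ 0 then
      let q1 := if alo < i ∧ blo < j then (alo, i, blo, j) :: rest else rest
      let q2 := if i + k < ahi ∧ j + k < bhi then (i + k, ahi, j + k, bhi) :: q1 else q1
      pvQueueLoop as_ bs b2j n q2 (acc ++ [x])
    else pvQueueLoop as_ bs b2j n rest acc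

-- matching_blocks.sort(): a stable insertion sort under Python's lexicographic tuple order
def pvLexLt (x y : Int × Int × Int) : Bool :=
  x.1 < y.1 || (x.1 == y.1 && (x.2.1 < y.2.1 || (x.2.1 == y.2.1 && x.2.2 < y.2.2)))

def pvInsertBlk (x : Int × Int × Int) : List (Int × Int × Int) → List (Int × Int × Int)
  | [] => [x]
  | y :: ys => if pvLexLt x y then x :: y :: ys else y :: pvInsertBlk x ys

def pvSortBlocks (l : List (Int × Int × Int)) : List (Int × Int × Int) :=
  l.foldl (fun acc x => pvInsertBlk x acc) []

-- the adjacent-block merge at the end of get_matching_blocks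
def pvMergeAdj : Int × Int × Int → List (Int × Int × Int) → List (Int × Int × Int)
  | (i1, j1, k1), [] => if k1 ≠ 0 then [(i1, j1, k1)] else []
  | (i1, j1, k1), (i2, j2, k2) :: rest =>
    if i1 + k1 = i2 ∧ j1 + k1 = j2 then pvMergeAdj (i1, j1, k1 + k2) rest
    else (if k1 ≠ 0 then [(i1, j1, k1)] else []) ++ pvMergeAdj (i2, j2, k2) rest

-- get_matching_blocks(): blocks plus the (la, lb, 0) sentinel
def pvBlocks (a b : String) : List (Int × Int × Int) :=
  let as_ := a.toList
  let bs := b.toList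
  let la : Int := as_.length
  let lb : Int := bs.length
  let raw := pvQueueLoop as_ bs (pvB2J bs)
    (2 * min as_.length bs.length + 2) [(0, la, 0, lb)] []
  pvMergeAdj (0, 0, 0) (pvSortBlocks raw) ++ [(la, lb, 0)]

inductive PvTag | equal | replace | delete | insert
deriving DecidableEq, Repr

-- get_opcodes(): the tagging walk over the matching blocks
def pvOpGen (i j : Int) : List (Int × Int × Int) → List (PvTag × Int × Int × Int × Int)
  | [] => []
  | (ai, bj, size) :: rest =>
    let tagged :=
      if i < ai ∧ j < bj then [(PvTag.replace, i, ai, j, bj)]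
      else if i < ai then [(PvTag.delete, i, ai, j, bj)]
      else if j < bj then [(PvTag.insert, i, ai, j, bj)]
      else []
    let i' := ai + size
    let j' := bj + size
    tagged ++ (if size ≠ 0 then [(PvTag.equal, ai, i', bj, j')] else []) ++ pvOpGen i' j' rest

-- the body of A's for-loop over get_opcodes()
def pvSegStep (a b : String) (st : List (String × Bool) × List (String × Bool))
    (op : PvTag × Int × Int × Int × Int) : List (String × Bool) × List (String × Bool) :=
  let (tag, i1, i2, j1, j2) := op
  if tag = PvTag.equal then
    (st.1 ++ [(PySem.Str.slice a (some i1) (some i2), false)],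
     st.2 ++ [(PySem.Str.slice b (some j1) (some j2), false)])
  else if tag = PvTag.replace then
    (st.1 ++ [(PySem.Str.slice a (some i1) (some i2), true)],
     st.2 ++ [(PySem.Str.slice b (some j1) (some j2), true)])
  else if tag = PvTag.delete then
    (st.1 ++ [(PySem.Str.slice a (some i1) (some i2), true)], st.2)
  else
    (st.1, st.2 ++ [(PySem.Str.slice b (some j1) (some j2), true)])

def diff_segments_py (a : String) (b : String) : (List (String × Bool)) × (List (String × Bool)) :=
  (pvOpGen 0 0 (pvBlocks a b)).foldl (pvSegStep a b) ([], [])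

-- ===== PORT B =====
-- body of _longest_match's inner 'for t in range(1, width+1)' loop over the dense row;
-- prev[t-1] and cur[t] = k are in-range Python list accesses: pyGetD/pySetD are exact here
def pvRowStep (as_ bs : List Char) (blo i : Int) (prev : List Int)
    (st : List Int × (Int × Int × Int)) (t : Int) : List Int × (Int × Int × Int) :=
  if PySem.List.pyGetD as_ i ' ' = PySem.List.pyGetD bs (blo + t - 1) ' ' then
    let k := PySem.List.pyGetD prev (t - 1) 0 + 1
    let cur := PySem.List.pySetD st.1 t k
    if st.2.2.2 < k then (cur, (i - k + 1, blo + t - k, k)) else (cur, st.2)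
  else st

-- _longest_match: dense suffix-length table, then the two maximal-extension while loops
def pvFLMAlt (as_ bs : List Char) (alo ahi blo bhi : Int) : Int × Int × Int :=
  let width := bhi - blo
  let st := (PySem.List.pyRange alo ahi 1).foldl
    (fun (st : List Int × (Int × Int × Int)) i =>
      (PySem.List.pyRange 1 (width + 1) 1).foldl
        (pvRowStep as_ bs blo i st.1) (List.replicate (width + 1).toNat 0, st.2))
    (List.replicate (width + 1).toNat 0, (alo, blo, 0))
  let b1 := pvExtL as_ bs alo blo (st.2.1 - alo).toNat st.2
  pvExtR as_ bs ahi bhi (ahi - (b1.1 + b1.2.2)).toNat b1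

-- _blocks: direct in-order recursion; fuel bounds the depth (each call strictly
-- shrinks the window, so len(a)+len(b)+1 levels always suffice)
def pvBlocksRec (as_ bs : List Char) :
    Nat → Int → Int → Int → Int → List (Int × Int × Int)
  | 0, _, _, _, _ => []
  | n + 1, alo, ahi, blo, bhi =>
    let x := pvFLMAlt as_ bs alo ahi blo bhi
    if x.2.2 ≠ 0 then
      (if alo < x.1 ∧ blo < x.2.1 then pvBlocksRec as_ bs n alo x.1 blo x.2.1 else [])
        ++ [x]
        ++ (if x.1 + x.2.2 < ahi ∧ x.2.1 + x.2.2 < bhi then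
              pvBlocksRec as_ bs n (x.1 + x.2.2) ahi (x.2.1 + x.2.2) bhi
            else [])
    else []

-- body of _merged_blocks' loop: peek at the last accumulated block, pop-and-extend or append
def pvMergeStep (acc : List (Int × Int × Int)) (blk : Int × Int × Int) :
    List (Int × Int × Int) :=
  match acc.getLast? with
  | some last =>
    if last.1 + last.2.2 = blk.1 ∧ last.2.1 + last.2.2 = blk.2.1 then
      acc.dropLast ++ [(last.1, last.2.1, last.2.2 + blk.2.2)]
    else acc ++ [blk]
  | none => acc ++ [blk]

def pvMergedBlocks (a b : String) : List (Int × Int × Int) :=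
  (pvBlocksRec a.toList b.toList (a.length + b.length + 1)
      0 (a.length : Int) 0 (b.length : Int)).foldl pvMergeStep []

-- body of _segments_along's for-loop: gap (changed) then matched span (unchanged)
def pvAlongStep (s : String) (st : List (String × Bool) × Int) (sp : Int × Int) :
    List (String × Bool) × Int :=
  let (segs, pos) := st
  let (start, size) := sp
  let segs := if pos < start then segs ++ [(PySem.Str.slice s (some pos) (some start), true)] else segs
  (segs ++ [(PySem.Str.slice s (some start) (some (start + size)), false)], start + size)

-- _segments_along(s, spans): the loop, then the trailing-gap check
def pvSegsAlong (s : String) (spans : List (Int × Int)) : List (String × Bool) :=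
  let r := spans.foldl (pvAlongStep s) ([], 0)
  if r.2 < (s.length : Int) then r.1 ++ [(PySem.Str.slice s (some r.2) none, true)] else r.1

def diff_segments_py_alt (a : String) (b : String) :
    (List (String × Bool)) × (List (String × Bool)) :=
  let blocks := pvMergedBlocks a b
  (pvSegsAlong a (blocks.map fun t => (t.1, t.2.2)),
   pvSegsAlong b (blocks.map fun t => (t.2.1, t.2.2)))

-- ===== PRECONDITION & SPEC =====
def Spec_diff_segments_py (a : String) (b : String) (out : (List (String × Bool)) × (List (String × Bool))) : Prop := out = diff_segments_py_alt a b
instance (a : String) (b : String) (out : (List (String × Bool)) × (List (String × Bool))) : Decidable (Spec_diff_segments_py a b out) := by unfold Spec_diff_segments_py; infer_instance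

-- ===== CLAIM (what is proved, stated in full; the proofs are below) =====
def Claim_equal_diff_segments_py : Prop := ∀ (a : String) (b : String), Dom_diff_segments_py a b → Spec_diff_segments_py a b (diff_segments_py a b)

-- ===== LEMMAS AND PROOFS =====

-- Python's in-range list assignment is List.set
theorem pvPySetD_eq_set (xs : List Int) (i v : Int) (h0 : 0 ≤ i) (h1 : i < (xs.length : Int)) :
    PySem.List.pySetD xs i v = xs.set i.toNat v := by
  simp only [PySem.List.pySetD, PySem.List.pySet?, PySem.List.pyIdx?]
  split_ifs <;> simp_all

-- Python's defaulted read at a nonnegative index is List.getD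
theorem pvPyGetD_nonneg {α : Type} (xs : List α) (i : Int) (d : α) (h0 : 0 ≤ i) :
    PySem.List.pyGetD xs i d = xs.getD i.toNat d := by
  simp [PySem.List.pyGetD, PySem.List.pyGet?_of_nonneg xs h0, List.getD]

-- b2j lists one character's positions: exactly the filtered index range
theorem pvB2J_getD (bs : List Char) (c : Char) :
    PySem.Dict.getD (pvB2J bs) c []
      = (PySem.List.pyRange 0 (bs.length : Int) 1).filter
          (fun j => PySem.List.pyGetD bs j ' ' == c) := by
  unfold pvB2J
  have h1 : (PySem.List.enumerate bs).foldl
      (fun d p => PySem.Dict.modify d p.2 [] (fun l => l ++ [p.1])) PySem.Dict.empty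
      = ((PySem.List.enumerate bs).map (fun p => (p.2, p.1))).foldl
        (fun d q => PySem.Dict.modify d q.1 [] (fun l => l ++ [q.2])) PySem.Dict.empty := by
    rw [List.foldl_map]
  rw [h1, PySem.Dict.getD_foldl_modify_append, PySem.List.enumerate_eq_map_pyRange bs ' ']
  simp [List.map_map, List.filter_map, Function.comp_def]

-- the continue/break sparse scan is the scan of the window-filtered list
theorem pvFlmInner_filter (jd : PySem.Dict Int Int) (blo bhi i : Int) :
    ∀ (l : List Int), l.Pairwise (· < ·) → ∀ (nj : PySem.Dict Int Int) (best : Int × Int × Int),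
    pvFlmInner jd blo bhi i l nj best
      = pvFlmInner jd blo bhi i
          (l.filter (fun j => decide (blo ≤ j) && decide (j < bhi))) nj best := by
  intro l
  induction l with
  | nil => intro _ nj best; simp
  | cons j rest ih =>
    intro hp nj best
    rw [List.pairwise_cons] at hp
    by_cases h1 : j < blo
    · rw [List.filter_cons_of_neg (by simp; omega)]
      simp only [pvFlmInner, if_pos h1]
      exact ih hp.2 nj best
    · by_cases h2 : bhi ≤ j
      · rw [List.filter_cons_of_neg (by simp; omega)]
        have hrest : rest.filter (fun j => decide (blo ≤ j) && decide (j < bhi)) = [] := by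
          rw [List.filter_eq_nil_iff]
          intro a ha
          have := hp.1 a ha
          simp
          omega
        rw [hrest]
        simp only [pvFlmInner, if_neg h1, if_pos h2]
      · rw [List.filter_cons_of_pos (by simp; omega)]
        simp only [pvFlmInner, if_neg h1, if_neg h2]
        exact ih hp.2 _ _

-- correspondence between the sparse dict row and the dense array row
def pvRelD (blo bhi : Int) (d : PySem.Dict Int Int) (arr : List Int) : Prop :=
  arr.length = (bhi - blo + 1).toNat ∧ arr.getD 0 0 = 0 ∧
  (∀ j : Int, blo ≤ j ∧ j < bhi → PySem.Dict.getD d j 0 = arr.getD ((j - blo).toNat + 1) 0) ∧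
  (∀ j : Int, ¬(blo ≤ j ∧ j < bhi) → PySem.Dict.getD d j 0 = 0)

-- one row, walked with two pointers: the sparse scan over the matched positions and the
-- dense scan over all positions compute the same best and corresponding rows
theorem pvRow_corr (as_ bs : List Char) (blo bhi i : Int) (jd : PySem.Dict Int Int)
    (prev : List Int) (hprev : pvRelD blo bhi jd prev) :
    ∀ (cnt : Nat) (m : Int) (nj : PySem.Dict Int Int) (cur : List Int) (best : Int × Int × Int),
    (bhi - m).toNat = cnt → blo ≤ m → m ≤ bhi →
    cur.length = (bhi - blo + 1).toNat → cur.getD 0 0 = 0 →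
    (∀ j : Int, blo ≤ j ∧ j < m → PySem.Dict.getD nj j 0 = cur.getD ((j - blo).toNat + 1) 0) →
    (∀ j : Int, ¬(blo ≤ j ∧ j < m) → PySem.Dict.getD nj j 0 = 0) →
    (∀ tn : Nat, (m - blo).toNat + 1 ≤ tn → cur.getD tn 0 = 0) →
    (pvFlmInner jd blo bhi i ((PySem.List.pyRange m bhi 1).filter
          (fun j => PySem.List.pyGetD bs j ' ' == PySem.List.pyGetD as_ i ' ')) nj best).2
        = ((PySem.List.pyRange ((m - blo) + 1) (bhi - blo + 1) 1).foldl
            (pvRowStep as_ bs blo i prev) (cur, best)).2 ∧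
      pvRelD blo bhi
        (pvFlmInner jd blo bhi i ((PySem.List.pyRange m bhi 1).filter
          (fun j => PySem.List.pyGetD bs j ' ' == PySem.List.pyGetD as_ i ' ')) nj best).1
        ((PySem.List.pyRange ((m - blo) + 1) (bhi - blo + 1) 1).foldl
            (pvRowStep as_ bs blo i prev) (cur, best)).1 := by
  intro cnt
  induction cnt with
  | zero =>
    intro m nj cur best hcnt hm0 hm1 hlen h0 hin hout hup
    have e1 : PySem.List.pyRange m bhi 1 = [] := by
      rw [PySem.List.pyRange_one, show (bhi - m).toNat = 0 from by omega]
      simp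
    have e2 : PySem.List.pyRange ((m - blo) + 1) (bhi - blo + 1) 1 = [] := by
      rw [PySem.List.pyRange_one,
        show ((bhi - blo + 1) - ((m - blo) + 1)).toNat = 0 from by omega]
      simp
    rw [e1, e2]
    simp only [List.filter_nil, pvFlmInner, List.foldl_nil]
    exact ⟨trivial, hlen, h0, fun j hj => hin j ⟨hj.1, by omega⟩, fun j hj => hout j (by omega)⟩
  | succ cnt ih =>
    intro m nj cur best hcnt hm0 hm1 hlen h0 hin hout hup
    have hmlt : m < bhi := by omega
    have htn : ((m - blo) + 1).toNat = (m - blo).toNat + 1 := by omega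
    rw [PySem.List.pyRange_one_cons hmlt, PySem.List.pyRange_one_cons
      (show (m - blo) + 1 < bhi - blo + 1 by omega)]
    simp only [List.foldl_cons]
    by_cases hq : PySem.List.pyGetD bs m ' ' = PySem.List.pyGetD as_ i ' '
    · -- matched position: both sides perform the same update
      rw [List.filter_cons_of_pos (by simp [hq])]
      -- compute the dense step
      have hread : PySem.Dict.getD jd (m - 1) 0
          = PySem.List.pyGetD prev ((m - blo) + 1 - 1) 0 := by
        obtain ⟨hl, hz, hw, ho⟩ := hprev
        rw [pvPyGetD_nonneg _ _ _ (by omega)]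
        by_cases hmb : blo ≤ m - 1
        · rw [hw (m - 1) ⟨hmb, by omega⟩]
          congr 1
          omega
        · rw [ho (m - 1) (by omega)]
          rw [show ((m - blo) + 1 - 1).toNat = 0 from by omega, hz]
      have hdense : pvRowStep as_ bs blo i prev (cur, best) ((m - blo) + 1)
          = (PySem.List.pySetD cur ((m - blo) + 1) (PySem.Dict.getD jd (m - 1) 0 + 1),
             if best.2.2 < PySem.Dict.getD jd (m - 1) 0 + 1 then
               (i - (PySem.Dict.getD jd (m - 1) 0 + 1) + 1,
                m - (PySem.Dict.getD jd (m - 1) 0 + 1) + 1,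
                PySem.Dict.getD jd (m - 1) 0 + 1)
             else best) := by
        simp only [pvRowStep]
        rw [show blo + ((m - blo) + 1) - 1 = m from by ring]
        rw [if_pos hq.symm, ← hread]
        split_ifs with hbb
        · rw [show blo + ((m - blo) + 1) - (PySem.Dict.getD jd (m - 1) 0 + 1)
            = m - (PySem.Dict.getD jd (m - 1) 0 + 1) + 1 from by ring]
        · rfl
      rw [hdense]
      -- compute the sparse step
      have hsparse : pvFlmInner jd blo bhi i
          (m :: (PySem.List.pyRange (m + 1) bhi 1).filter
            (fun j => PySem.List.pyGetD bs j ' ' == PySem.List.pyGetD as_ i ' ')) nj best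
          = pvFlmInner jd blo bhi i
            ((PySem.List.pyRange (m + 1) bhi 1).filter
              (fun j => PySem.List.pyGetD bs j ' ' == PySem.List.pyGetD as_ i ' '))
            (PySem.Dict.insert nj m (PySem.Dict.getD jd (m - 1) 0 + 1))
            (if best.2.2 < PySem.Dict.getD jd (m - 1) 0 + 1 then
               (i - (PySem.Dict.getD jd (m - 1) 0 + 1) + 1,
                m - (PySem.Dict.getD jd (m - 1) 0 + 1) + 1,
                PySem.Dict.getD jd (m - 1) 0 + 1)
             else best) := by
        simp only [pvFlmInner, if_neg (show ¬ m < blo by omega), if_neg (show ¬ bhi ≤ m by omega)]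
      rw [hsparse]
      -- the updated array
      have hsetlen : ((m - blo) + 1) < (cur.length : Int) := by rw [hlen]; omega
      have hset : PySem.List.pySetD cur ((m - blo) + 1) (PySem.Dict.getD jd (m - 1) 0 + 1)
          = cur.set ((m - blo).toNat + 1) (PySem.Dict.getD jd (m - 1) 0 + 1) := by
        rw [pvPySetD_eq_set _ _ _ (by omega) hsetlen, htn]
      rw [hset]
      rw [show (m - blo) + 1 + 1 = m + 1 - blo + 1 from by ring]
      -- recurse
      refine ih (m + 1) _ _ _ (by omega) (by omega) (by omega) (by simp [hlen]) ?_ ?_ ?_ ?_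
      · -- position 0 untouched
        have : ((m - blo).toNat + 1 : Nat) ≠ 0 := by omega
        simp only [List.getD, List.getElem?_set_ne this]
        simpa [List.getD] using h0
      · -- processed region
        intro j hj
        rw [PySem.Dict.getD_insert]
        by_cases hjm : j = m
        · subst hjm
          rw [if_pos rfl]
          have hlt : (j - blo).toNat + 1 < cur.length := by rw [hlen]; omega
          simp [List.getD, List.getElem?_set_self hlt]
        · rw [if_neg hjm]
          have hne : ((m - blo).toNat + 1 : Nat) ≠ ((j - blo).toNat + 1 : Nat) := by omega
          have := hin j ⟨hj.1, by omega⟩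
          simp only [List.getD, List.getElem?_set_ne hne] at *
          exact this
      · -- untouched dict positions
        intro j hj
        rw [PySem.Dict.getD_insert, if_neg (by omega)]
        exact hout j (by omega)
      · -- still-zero upper region
        intro tn htup
        have hne : ((m - blo).toNat + 1 : Nat) ≠ tn := by omega
        simp only [List.getD, List.getElem?_set_ne hne]
        have := hup tn (by omega)
        simpa [List.getD] using this
    · -- unmatched: the sparse filter drops it, the dense step is the identity
      rw [List.filter_cons_of_neg (by simp [hq])]
      have hid : pvRowStep as_ bs blo i prev (cur, best) ((m - blo) + 1) = (cur, best) := by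
        simp only [pvRowStep]
        rw [show blo + ((m - blo) + 1) - 1 = m from by ring]
        rw [if_neg (fun h => hq h.symm)]
      rw [hid]
      rw [show (m - blo) + 1 + 1 = m + 1 - blo + 1 from by ring]
      refine ih (m + 1) nj cur best (by omega) (by omega) (by omega) hlen h0 ?_ ?_ ?_
      · intro j hj
        by_cases hjm : j = m
        · subst hjm
          rw [hout j (by omega)]
          rw [hup ((j - blo).toNat + 1) (by omega)]
        · exact hin j ⟨hj.1, by omega⟩
      · intro j hj
        exact hout j (by omega)
      · intro tn htup
        exact hup tn (by omega)

-- one full row: the sparse b2j scan equals the dense scan, from corresponding states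
theorem pvRowEq (as_ bs : List Char) (blo bhi : Int)
    (hb0 : 0 ≤ blo) (hb1 : bhi ≤ (bs.length : Int)) (i : Int)
    (jd : PySem.Dict Int Int) (arr : List Int) (best : Int × Int × Int)
    (hrel : pvRelD blo bhi jd arr) :
    (pvFlmInner jd blo bhi i
        (PySem.Dict.getD (pvB2J bs) (PySem.List.pyGetD as_ i ' ') []) PySem.Dict.empty best).2
      = ((PySem.List.pyRange 1 (bhi - blo + 1) 1).foldl (pvRowStep as_ bs blo i arr)
          (List.replicate (bhi - blo + 1).toNat 0, best)).2 ∧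
    pvRelD blo bhi
      (pvFlmInner jd blo bhi i
        (PySem.Dict.getD (pvB2J bs) (PySem.List.pyGetD as_ i ' ') []) PySem.Dict.empty best).1
      ((PySem.List.pyRange 1 (bhi - blo + 1) 1).foldl (pvRowStep as_ bs blo i arr)
          (List.replicate (bhi - blo + 1).toNat 0, best)).1 := by
  have hrep0 : ∀ tn : Nat, (List.replicate (bhi - blo + 1).toNat (0 : Int)).getD tn 0 = 0 := by
    intro tn
    simp [List.getD, List.getElem?_replicate]
    split_ifs <;> simp
  have hreplen : (List.replicate (bhi - blo + 1).toNat (0 : Int)).length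
      = (bhi - blo + 1).toNat := by simp
  rw [pvB2J_getD]
  rw [pvFlmInner_filter jd blo bhi i _
    (List.Pairwise.filter _ (PySem.List.pairwise_lt_pyRange_one 0 (bs.length : Int)))]
  rw [List.filter_filter]
  by_cases hwin : blo ≤ bhi
  · have hsplit : PySem.List.pyRange 0 (bs.length : Int) 1
        = PySem.List.pyRange 0 blo 1 ++ PySem.List.pyRange blo bhi 1
          ++ PySem.List.pyRange bhi (bs.length : Int) 1 := by
      rw [PySem.List.pyRange_one_append 0 bhi (bs.length : Int) (by omega) hb1,
        PySem.List.pyRange_one_append 0 blo bhi hb0 hwin]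
    rw [hsplit, List.filter_append, List.filter_append]
    have hleft : (PySem.List.pyRange 0 blo 1).filter
        (fun a => (decide (blo ≤ a) && decide (a < bhi)) &&
          (PySem.List.pyGetD bs a ' ' == PySem.List.pyGetD as_ i ' ')) = [] := by
      rw [List.filter_eq_nil_iff]
      intro a ha
      rw [PySem.List.mem_pyRange_one] at ha
      simp
      omega
    have hright : (PySem.List.pyRange bhi (bs.length : Int) 1).filter
        (fun a => (decide (blo ≤ a) && decide (a < bhi)) &&
          (PySem.List.pyGetD bs a ' ' == PySem.List.pyGetD as_ i ' ')) = [] := by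
      rw [List.filter_eq_nil_iff]
      intro a ha
      rw [PySem.List.mem_pyRange_one] at ha
      simp
      omega
    have hmid : (PySem.List.pyRange blo bhi 1).filter
        (fun a => (decide (blo ≤ a) && decide (a < bhi)) &&
          (PySem.List.pyGetD bs a ' ' == PySem.List.pyGetD as_ i ' '))
        = (PySem.List.pyRange blo bhi 1).filter
          (fun j => PySem.List.pyGetD bs j ' ' == PySem.List.pyGetD as_ i ' ') := by
      apply List.filter_congr
      intro a ha
      rw [PySem.List.mem_pyRange_one] at ha
      have h1 : decide (blo ≤ a) = true := by simp; omega
      have h2 : decide (a < bhi) = true := by simp; omega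
      rw [h1, h2]
      simp
    rw [hleft, hright, hmid, List.nil_append, List.append_nil]
    have h := pvRow_corr as_ bs blo bhi i jd arr hrel (bhi - blo).toNat blo
      PySem.Dict.empty (List.replicate (bhi - blo + 1).toNat 0) best rfl le_rfl hwin
      hreplen (hrep0 0) (fun j hj => by omega)
      (fun j _ => PySem.Dict.getD_empty j 0) (fun tn _ => hrep0 tn)
    rw [show (blo - blo) + 1 = 1 from by ring] at h
    exact h
  · -- empty window: both sides do nothing
    have hnil : ∀ (l : List Int), l.filter
        (fun a => (decide (blo ≤ a) && decide (a < bhi)) &&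
          (PySem.List.pyGetD bs a ' ' == PySem.List.pyGetD as_ i ' ')) = [] := by
      intro l
      rw [List.filter_eq_nil_iff]
      intro a _
      simp
      omega
    rw [hnil]
    have hr : PySem.List.pyRange 1 (bhi - blo + 1) 1 = [] := by
      rw [PySem.List.pyRange_one, show ((bhi - blo + 1) - 1).toNat = 0 from by omega]
      simp
    rw [hr]
    simp only [pvFlmInner, List.foldl_nil]
    exact ⟨trivial, hreplen, hrep0 0, fun j hj => by omega,
      fun j _ => PySem.Dict.getD_empty j 0⟩

-- the whole row loop, in lock step
theorem pvRows_corr (as_ bs : List Char) (blo bhi : Int)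
    (hb0 : 0 ≤ blo) (hb1 : bhi ≤ (bs.length : Int)) :
    ∀ (rows : List Int) (jd : PySem.Dict Int Int) (arr : List Int) (best : Int × Int × Int),
    pvRelD blo bhi jd arr →
    (rows.foldl (fun (st : PySem.Dict Int Int × (Int × Int × Int)) i =>
        pvFlmInner st.1 blo bhi i
          (PySem.Dict.getD (pvB2J bs) (PySem.List.pyGetD as_ i ' ') [])
          PySem.Dict.empty st.2) (jd, best)).2
      = (rows.foldl (fun (st : List Int × (Int × Int × Int)) i =>
          (PySem.List.pyRange 1 (bhi - blo + 1) 1).foldl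
            (pvRowStep as_ bs blo i st.1) (List.replicate (bhi - blo + 1).toNat 0, st.2))
          (arr, best)).2 := by
  intro rows
  induction rows with
  | nil => intro jd arr best _; rfl
  | cons i rest ih =>
    intro jd arr best hrel
    simp only [List.foldl_cons]
    obtain ⟨heq, hrel'⟩ := pvRowEq as_ bs blo bhi hb0 hb1 i jd arr best hrel
    have hpair : (pvFlmInner jd blo bhi i
          (PySem.Dict.getD (pvB2J bs) (PySem.List.pyGetD as_ i ' ') [])
          PySem.Dict.empty best)
        = ((pvFlmInner jd blo bhi i
            (PySem.Dict.getD (pvB2J bs) (PySem.List.pyGetD as_ i ' ') [])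
            PySem.Dict.empty best).1,
           ((PySem.List.pyRange 1 (bhi - blo + 1) 1).foldl (pvRowStep as_ bs blo i arr)
            (List.replicate (bhi - blo + 1).toNat 0, best)).2) := by
      rw [← heq]
    rw [hpair]
    exact ih _ _ _ hrel'

-- the central bridge: the two longest-match computations agree on valid windows
theorem pvFLM_eq_alt (as_ bs : List Char) (alo ahi blo bhi : Int)
    (hb0 : 0 ≤ blo) (hb1 : bhi ≤ (bs.length : Int)) :
    pvFLM as_ bs (pvB2J bs) alo ahi blo bhi = pvFLMAlt as_ bs alo ahi blo bhi := by
  unfold pvFLM pvFLMAlt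
  dsimp only
  have hrel0 : pvRelD blo bhi PySem.Dict.empty (List.replicate (bhi - blo + 1).toNat 0) := by
    refine ⟨by simp, ?_, fun j hj => ?_, fun j _ => PySem.Dict.getD_empty j 0⟩
    · simp [List.getD, List.getElem?_replicate]
      split_ifs <;> simp
    · rw [PySem.Dict.getD_empty]
      simp [List.getD, List.getElem?_replicate]
      split_ifs <;> simp
  have h := pvRows_corr as_ bs blo bhi hb0 hb1 (PySem.List.pyRange alo ahi 1)
    PySem.Dict.empty (List.replicate (bhi - blo + 1).toNat 0) (alo, blo, 0) hrel0
  rw [h]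


-- the in-window invariant of the best block, used throughout
def PvBestInv (alo ahi blo bhi : Int) (bst : Int × Int × Int) : Prop :=
  alo ≤ bst.1 ∧ blo ≤ bst.2.1 ∧ 0 ≤ bst.2.2 ∧ bst.1 + bst.2.2 ≤ ahi ∧ bst.2.1 + bst.2.2 ≤ bhi

-- one dense row keeps the entry bounds and the best-block invariant
theorem pvRow_inv (as_ bs : List Char) (alo ahi blo bhi m : Int) (prev : List Int)
    (best : Int × Int × Int) (hm0 : alo ≤ m) (hm1 : m < ahi)
    (hent : ∀ tn : Nat, 0 ≤ prev.getD tn 0 ∧ prev.getD tn 0 ≤ (tn : Int) ∧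
      prev.getD tn 0 ≤ m - alo)
    (hbest : PvBestInv alo ahi blo bhi best) :
    ((PySem.List.pyRange 1 (bhi - blo + 1) 1).foldl (pvRowStep as_ bs blo m prev)
        (List.replicate (bhi - blo + 1).toNat 0, best)).1.length
      = (bhi - blo + 1).toNat ∧
    (∀ tn : Nat,
      0 ≤ ((PySem.List.pyRange 1 (bhi - blo + 1) 1).foldl (pvRowStep as_ bs blo m prev)
          (List.replicate (bhi - blo + 1).toNat 0, best)).1.getD tn 0 ∧
      ((PySem.List.pyRange 1 (bhi - blo + 1) 1).foldl (pvRowStep as_ bs blo m prev)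
          (List.replicate (bhi - blo + 1).toNat 0, best)).1.getD tn 0 ≤ (tn : Int) ∧
      ((PySem.List.pyRange 1 (bhi - blo + 1) 1).foldl (pvRowStep as_ bs blo m prev)
          (List.replicate (bhi - blo + 1).toNat 0, best)).1.getD tn 0 ≤ m - alo + 1) ∧
    PvBestInv alo ahi blo bhi
      ((PySem.List.pyRange 1 (bhi - blo + 1) 1).foldl (pvRowStep as_ bs blo m prev)
        (List.replicate (bhi - blo + 1).toNat 0, best)).2 := by
  refine List.foldlRecOn
    (motive := fun (st : List Int × (Int × Int × Int)) =>
      st.1.length = (bhi - blo + 1).toNat ∧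
      (∀ tn : Nat, 0 ≤ st.1.getD tn 0 ∧ st.1.getD tn 0 ≤ (tn : Int) ∧
        st.1.getD tn 0 ≤ m - alo + 1) ∧
      PvBestInv alo ahi blo bhi st.2) _ _ ?_ ?_
  · refine ⟨by simp, fun tn => ?_, hbest⟩
    have : (List.replicate (bhi - blo + 1).toNat (0 : Int)).getD tn 0 = 0 := by
      simp [List.getD, List.getElem?_replicate]
      split_ifs <;> simp
    rw [this]
    omega
  · rintro ⟨cur, bst⟩ ⟨hlen, hcur, hbst⟩ t ht
    rw [PySem.List.mem_pyRange_one] at ht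
    simp only [pvRowStep]
    split_ifs with hguard hupd
    · -- matched, best updated
      have hread : PySem.List.pyGetD prev (t - 1) 0 = prev.getD (t - 1).toNat 0 :=
        pvPyGetD_nonneg _ _ _ (by omega)
      have hk := hent (t - 1).toNat
      have htn : ((t - 1).toNat : Int) = t - 1 := Int.toNat_of_nonneg (by omega)
      have hset : PySem.List.pySetD cur t (PySem.List.pyGetD prev (t - 1) 0 + 1)
          = cur.set t.toNat (PySem.List.pyGetD prev (t - 1) 0 + 1) :=
        pvPySetD_eq_set _ _ _ (by omega) (by rw [hlen]; omega)
      refine ⟨by simp [hset, hlen], fun tn => ?_, ?_⟩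
      · rw [hset]
        by_cases he : t.toNat = tn
        · have : (cur.set t.toNat (PySem.List.pyGetD prev (t - 1) 0 + 1)).getD tn 0
              = PySem.List.pyGetD prev (t - 1) 0 + 1 := by
            subst he
            simp [List.getD, show t.toNat < cur.length by rw [hlen]; omega]
          rw [this, hread]
          have : (tn : Int) = t := by omega
          omega
        · have : (cur.set t.toNat (PySem.List.pyGetD prev (t - 1) 0 + 1)).getD tn 0
              = cur.getD tn 0 := by
            simp [List.getD, List.getElem?_set_ne he]
          rw [this]
          exact hcur tn
      · unfold PvBestInv at hbst ⊢
        dsimp only at hbst ⊢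
        rw [hread] at hupd ⊢
        omega
    · -- matched, best kept
      have hset : PySem.List.pySetD cur t (PySem.List.pyGetD prev (t - 1) 0 + 1)
          = cur.set t.toNat (PySem.List.pyGetD prev (t - 1) 0 + 1) :=
        pvPySetD_eq_set _ _ _ (by omega) (by rw [hlen]; omega)
      have hread : PySem.List.pyGetD prev (t - 1) 0 = prev.getD (t - 1).toNat 0 :=
        pvPyGetD_nonneg _ _ _ (by omega)
      have hk := hent (t - 1).toNat
      have htn : ((t - 1).toNat : Int) = t - 1 := Int.toNat_of_nonneg (by omega)
      refine ⟨by simp [hset, hlen], fun tn => ?_, hbst⟩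
      rw [hset]
      by_cases he : t.toNat = tn
      · have : (cur.set t.toNat (PySem.List.pyGetD prev (t - 1) 0 + 1)).getD tn 0
            = PySem.List.pyGetD prev (t - 1) 0 + 1 := by
          subst he
          simp [List.getD, show t.toNat < cur.length by rw [hlen]; omega]
        rw [this, hread]
        have : (tn : Int) = t := by omega
        omega
      · have : (cur.set t.toNat (PySem.List.pyGetD prev (t - 1) 0 + 1)).getD tn 0
            = cur.getD tn 0 := by
          simp [List.getD, List.getElem?_set_ne he]
        rw [this]
        exact hcur tn
    · exact ⟨hlen, hcur, hbst⟩

-- the whole row loop keeps the best-block invariant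
theorem pvRows_inv (as_ bs : List Char) (alo ahi blo bhi : Int) :
    ∀ (cnt : Nat) (m : Int) (arr : List Int) (best : Int × Int × Int),
    (ahi - m).toNat = cnt → alo ≤ m →
    (∀ tn : Nat, 0 ≤ arr.getD tn 0 ∧ arr.getD tn 0 ≤ (tn : Int) ∧ arr.getD tn 0 ≤ m - alo) →
    PvBestInv alo ahi blo bhi best →
    PvBestInv alo ahi blo bhi
      (((PySem.List.pyRange m ahi 1).foldl
        (fun (st : List Int × (Int × Int × Int)) i =>
          (PySem.List.pyRange 1 (bhi - blo + 1) 1).foldl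
            (pvRowStep as_ bs blo i st.1) (List.replicate (bhi - blo + 1).toNat 0, st.2))
        (arr, best))).2 := by
  intro cnt
  induction cnt with
  | zero =>
    intro m arr best hcnt hm _ hbest
    have : PySem.List.pyRange m ahi 1 = [] := by
      rw [PySem.List.pyRange_one]
      simp [hcnt]
    rw [this]
    exact hbest
  | succ n ih =>
    intro m arr best hcnt hm hent hbest
    have hmlt : m < ahi := by omega
    rw [PySem.List.pyRange_one_cons hmlt, List.foldl_cons]
    have hrow := pvRow_inv as_ bs alo ahi blo bhi m arr best hm hmlt hent hbest
    exact ih (m + 1)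
      (((PySem.List.pyRange 1 (bhi - blo + 1) 1).foldl (pvRowStep as_ bs blo m arr)
        (List.replicate (bhi - blo + 1).toNat 0, best)).1) _
      (by omega) (by omega)
      (fun tn => by have := hrow.2.1 tn; omega)
      hrow.2.2

-- the left extension keeps the invariant
theorem pvExtL_inv (as_ bs : List Char) (alo ahi blo bhi : Int) :
    ∀ (n : Nat) (bst : Int × Int × Int), PvBestInv alo ahi blo bhi bst →
      PvBestInv alo ahi blo bhi (pvExtL as_ bs alo blo n bst) := by
  intro n
  induction n with
  | zero => intro bst h; exact h
  | succ n ih =>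
    rintro ⟨bi, bj, sz⟩ h
    unfold PvBestInv at h
    dsimp only at h
    simp only [pvExtL]
    split_ifs with hg
    · refine ih _ ?_
      unfold PvBestInv
      dsimp only
      omega
    · exact h

-- the right extension keeps the invariant
theorem pvExtR_inv (as_ bs : List Char) (alo ahi blo bhi : Int) :
    ∀ (n : Nat) (bst : Int × Int × Int), PvBestInv alo ahi blo bhi bst →
      PvBestInv alo ahi blo bhi (pvExtR as_ bs ahi bhi n bst) := by
  intro n
  induction n with
  | zero => intro bst h; exact h
  | succ n ih =>
    rintro ⟨bi, bj, sz⟩ h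
    unfold PvBestInv at h
    dsimp only at h
    simp only [pvExtR]
    split_ifs with hg
    · refine ih _ ?_
      unfold PvBestInv
      dsimp only
      omega
    · exact h

-- window bounds of the returned block
theorem pvFLMAlt_bounds (as_ bs : List Char) (alo ahi blo bhi : Int)
    (ha : alo ≤ ahi) (hb : blo ≤ bhi) :
    alo ≤ (pvFLMAlt as_ bs alo ahi blo bhi).1 ∧
    blo ≤ (pvFLMAlt as_ bs alo ahi blo bhi).2.1 ∧
    0 ≤ (pvFLMAlt as_ bs alo ahi blo bhi).2.2 ∧
    (pvFLMAlt as_ bs alo ahi blo bhi).1 + (pvFLMAlt as_ bs alo ahi blo bhi).2.2 ≤ ahi ∧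
    (pvFLMAlt as_ bs alo ahi blo bhi).2.1 + (pvFLMAlt as_ bs alo ahi blo bhi).2.2 ≤ bhi := by
  have h : PvBestInv alo ahi blo bhi (pvFLMAlt as_ bs alo ahi blo bhi) := by
    unfold pvFLMAlt
    dsimp only
    apply pvExtR_inv
    apply pvExtL_inv
    refine pvRows_inv as_ bs alo ahi blo bhi (ahi - alo).toNat alo _ _ rfl le_rfl
      (fun tn => ?_) ?_
    · have : (List.replicate (bhi - blo + 1).toNat (0 : Int)).getD tn 0 = 0 := by
        simp [List.getD, List.getElem?_replicate]
        split_ifs <;> simp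
      rw [this]
      omega
    · unfold PvBestInv
      dsimp only
      omega
  unfold PvBestInv at h
  exact h

-- a window that lies inside both strings
def pvValid (as_ bs : List Char) (alo ahi blo bhi : Int) : Prop :=
  0 ≤ alo ∧ alo ≤ ahi ∧ ahi ≤ (as_.length : Int) ∧
  0 ≤ blo ∧ blo ≤ bhi ∧ bhi ≤ (bs.length : Int)

-- the size measure of a window
def pvMu (alo ahi blo bhi : Int) : Nat := ((ahi - alo) + (bhi - blo)).toNat

-- the order in which A's LIFO queue emits the blocks: node, right subtree, left subtree
def pvPreRL (as_ bs : List Char) : Nat → Int → Int → Int → Int → List (Int × Int × Int)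
  | 0, _, _, _, _ => []
  | n + 1, alo, ahi, blo, bhi =>
    let x := pvFLMAlt as_ bs alo ahi blo bhi
    if x.2.2 ≠ 0 then
      x :: ((if x.1 + x.2.2 < ahi ∧ x.2.1 + x.2.2 < bhi then
              pvPreRL as_ bs n (x.1 + x.2.2) ahi (x.2.1 + x.2.2) bhi else [])
        ++ (if alo < x.1 ∧ blo < x.2.1 then pvPreRL as_ bs n alo x.1 blo x.2.1 else []))
    else []

-- convenience: the found block sits inside the window and both children are valid/smaller
theorem pvChild_facts (as_ bs : List Char) (alo ahi blo bhi : Int)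
    (hv : pvValid as_ bs alo ahi blo bhi)
    (hk : (pvFLMAlt as_ bs alo ahi blo bhi).2.2 ≠ 0) :
    alo ≤ (pvFLMAlt as_ bs alo ahi blo bhi).1 ∧
    blo ≤ (pvFLMAlt as_ bs alo ahi blo bhi).2.1 ∧
    0 < (pvFLMAlt as_ bs alo ahi blo bhi).2.2 ∧
    (pvFLMAlt as_ bs alo ahi blo bhi).1 + (pvFLMAlt as_ bs alo ahi blo bhi).2.2 ≤ ahi ∧
    (pvFLMAlt as_ bs alo ahi blo bhi).2.1 + (pvFLMAlt as_ bs alo ahi blo bhi).2.2 ≤ bhi ∧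
    pvValid as_ bs alo (pvFLMAlt as_ bs alo ahi blo bhi).1 blo
      (pvFLMAlt as_ bs alo ahi blo bhi).2.1 ∧
    pvValid as_ bs ((pvFLMAlt as_ bs alo ahi blo bhi).1 + (pvFLMAlt as_ bs alo ahi blo bhi).2.2)
      ahi ((pvFLMAlt as_ bs alo ahi blo bhi).2.1 + (pvFLMAlt as_ bs alo ahi blo bhi).2.2) bhi ∧
    pvMu alo (pvFLMAlt as_ bs alo ahi blo bhi).1 blo
      (pvFLMAlt as_ bs alo ahi blo bhi).2.1 + 2 ≤ pvMu alo ahi blo bhi ∧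
    pvMu ((pvFLMAlt as_ bs alo ahi blo bhi).1 + (pvFLMAlt as_ bs alo ahi blo bhi).2.2)
      ahi ((pvFLMAlt as_ bs alo ahi blo bhi).2.1 + (pvFLMAlt as_ bs alo ahi blo bhi).2.2) bhi + 2
      ≤ pvMu alo ahi blo bhi := by
  obtain ⟨v1, v2, v3, v4, v5, v6⟩ := hv
  obtain ⟨b1, b2, b3, b4, b5⟩ := pvFLMAlt_bounds as_ bs alo ahi blo bhi v2 v5
  unfold pvValid pvMu
  refine ⟨b1, b2, by omega, b4, b5, ?_, ?_, ?_, ?_⟩ <;> omega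

-- the recursion depends on its fuel only through "enough"
theorem pvBlocksRec_fuel (as_ bs : List Char) : ∀ (mu f1 f2 : Nat) (alo ahi blo bhi : Int),
    pvValid as_ bs alo ahi blo bhi → pvMu alo ahi blo bhi = mu → mu < f1 → mu < f2 →
    pvBlocksRec as_ bs f1 alo ahi blo bhi = pvBlocksRec as_ bs f2 alo ahi blo bhi := by
  intro mu
  induction mu using Nat.strong_induction_on with
  | _ mu ih =>
    intro f1 f2 alo ahi blo bhi hv hmu h1 h2
    obtain ⟨g1, rfl⟩ : ∃ g, f1 = g + 1 := ⟨f1 - 1, by omega⟩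
    obtain ⟨g2, rfl⟩ : ∃ g, f2 = g + 1 := ⟨f2 - 1, by omega⟩
    simp only [pvBlocksRec]
    by_cases hk : (pvFLMAlt as_ bs alo ahi blo bhi).2.2 ≠ 0
    · obtain ⟨c1, c2, c3, c4, c5, cvL, cvR, cmL, cmR⟩ := pvChild_facts as_ bs alo ahi blo bhi hv hk
      have eL : (if alo < (pvFLMAlt as_ bs alo ahi blo bhi).1 ∧
            blo < (pvFLMAlt as_ bs alo ahi blo bhi).2.1 then
            pvBlocksRec as_ bs g1 alo (pvFLMAlt as_ bs alo ahi blo bhi).1 blo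
              (pvFLMAlt as_ bs alo ahi blo bhi).2.1 else [])
          = (if alo < (pvFLMAlt as_ bs alo ahi blo bhi).1 ∧
            blo < (pvFLMAlt as_ bs alo ahi blo bhi).2.1 then
            pvBlocksRec as_ bs g2 alo (pvFLMAlt as_ bs alo ahi blo bhi).1 blo
              (pvFLMAlt as_ bs alo ahi blo bhi).2.1 else []) := by
        split_ifs with h
        · exact ih _ (by omega) g1 g2 _ _ _ _ cvL rfl (by omega) (by omega)
        · rfl
      have eR : (if (pvFLMAlt as_ bs alo ahi blo bhi).1 + (pvFLMAlt as_ bs alo ahi blo bhi).2.2 < ahi ∧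
            (pvFLMAlt as_ bs alo ahi blo bhi).2.1 + (pvFLMAlt as_ bs alo ahi blo bhi).2.2 < bhi then
            pvBlocksRec as_ bs g1
              ((pvFLMAlt as_ bs alo ahi blo bhi).1 + (pvFLMAlt as_ bs alo ahi blo bhi).2.2) ahi
              ((pvFLMAlt as_ bs alo ahi blo bhi).2.1 + (pvFLMAlt as_ bs alo ahi blo bhi).2.2) bhi
            else [])
          = (if (pvFLMAlt as_ bs alo ahi blo bhi).1 + (pvFLMAlt as_ bs alo ahi blo bhi).2.2 < ahi ∧
            (pvFLMAlt as_ bs alo ahi blo bhi).2.1 + (pvFLMAlt as_ bs alo ahi blo bhi).2.2 < bhi then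
            pvBlocksRec as_ bs g2
              ((pvFLMAlt as_ bs alo ahi blo bhi).1 + (pvFLMAlt as_ bs alo ahi blo bhi).2.2) ahi
              ((pvFLMAlt as_ bs alo ahi blo bhi).2.1 + (pvFLMAlt as_ bs alo ahi blo bhi).2.2) bhi
            else []) := by
        split_ifs with h
        · exact ih _ (by omega) g1 g2 _ _ _ _ cvR rfl (by omega) (by omega)
        · rfl
      rw [if_pos hk, if_pos hk, eL, eR]
    · rw [if_neg hk, if_neg hk]

-- same for the queue's emission order
theorem pvPreRL_fuel (as_ bs : List Char) : ∀ (mu f1 f2 : Nat) (alo ahi blo bhi : Int),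
    pvValid as_ bs alo ahi blo bhi → pvMu alo ahi blo bhi = mu → mu < f1 → mu < f2 →
    pvPreRL as_ bs f1 alo ahi blo bhi = pvPreRL as_ bs f2 alo ahi blo bhi := by
  intro mu
  induction mu using Nat.strong_induction_on with
  | _ mu ih =>
    intro f1 f2 alo ahi blo bhi hv hmu h1 h2
    obtain ⟨g1, rfl⟩ : ∃ g, f1 = g + 1 := ⟨f1 - 1, by omega⟩
    obtain ⟨g2, rfl⟩ : ∃ g, f2 = g + 1 := ⟨f2 - 1, by omega⟩
    simp only [pvPreRL]
    by_cases hk : (pvFLMAlt as_ bs alo ahi blo bhi).2.2 ≠ 0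
    · obtain ⟨c1, c2, c3, c4, c5, cvL, cvR, cmL, cmR⟩ := pvChild_facts as_ bs alo ahi blo bhi hv hk
      have eL : (if alo < (pvFLMAlt as_ bs alo ahi blo bhi).1 ∧
            blo < (pvFLMAlt as_ bs alo ahi blo bhi).2.1 then
            pvPreRL as_ bs g1 alo (pvFLMAlt as_ bs alo ahi blo bhi).1 blo
              (pvFLMAlt as_ bs alo ahi blo bhi).2.1 else [])
          = (if alo < (pvFLMAlt as_ bs alo ahi blo bhi).1 ∧
            blo < (pvFLMAlt as_ bs alo ahi blo bhi).2.1 then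
            pvPreRL as_ bs g2 alo (pvFLMAlt as_ bs alo ahi blo bhi).1 blo
              (pvFLMAlt as_ bs alo ahi blo bhi).2.1 else []) := by
        split_ifs with h
        · exact ih _ (by omega) g1 g2 _ _ _ _ cvL rfl (by omega) (by omega)
        · rfl
      have eR : (if (pvFLMAlt as_ bs alo ahi blo bhi).1 + (pvFLMAlt as_ bs alo ahi blo bhi).2.2 < ahi ∧
            (pvFLMAlt as_ bs alo ahi blo bhi).2.1 + (pvFLMAlt as_ bs alo ahi blo bhi).2.2 < bhi then
            pvPreRL as_ bs g1
              ((pvFLMAlt as_ bs alo ahi blo bhi).1 + (pvFLMAlt as_ bs alo ahi blo bhi).2.2) ahi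
              ((pvFLMAlt as_ bs alo ahi blo bhi).2.1 + (pvFLMAlt as_ bs alo ahi blo bhi).2.2) bhi
            else [])
          = (if (pvFLMAlt as_ bs alo ahi blo bhi).1 + (pvFLMAlt as_ bs alo ahi blo bhi).2.2 < ahi ∧
            (pvFLMAlt as_ bs alo ahi blo bhi).2.1 + (pvFLMAlt as_ bs alo ahi blo bhi).2.2 < bhi then
            pvPreRL as_ bs g2
              ((pvFLMAlt as_ bs alo ahi blo bhi).1 + (pvFLMAlt as_ bs alo ahi blo bhi).2.2) ahi
              ((pvFLMAlt as_ bs alo ahi blo bhi).2.1 + (pvFLMAlt as_ bs alo ahi blo bhi).2.2) bhi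
            else []) := by
        split_ifs with h
        · exact ih _ (by omega) g1 g2 _ _ _ _ cvR rfl (by omega) (by omega)
        · rfl
      rw [if_pos hk, if_pos hk, eL, eR]
    · rw [if_neg hk, if_neg hk]

-- the queue order is a permutation of the in-order list (same fuel)
theorem pvPreRL_perm (as_ bs : List Char) : ∀ (n : Nat) (alo ahi blo bhi : Int),
    (pvPreRL as_ bs n alo ahi blo bhi).Perm (pvBlocksRec as_ bs n alo ahi blo bhi) := by
  intro n
  induction n with
  | zero => intro alo ahi blo bhi; simp [pvPreRL, pvBlocksRec]
  | succ n ih =>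
    intro alo ahi blo bhi
    simp only [pvPreRL, pvBlocksRec]
    by_cases hk : (pvFLMAlt as_ bs alo ahi blo bhi).2.2 ≠ 0
    · rw [if_pos hk, if_pos hk]
      have hLp : (if alo < (pvFLMAlt as_ bs alo ahi blo bhi).1 ∧
            blo < (pvFLMAlt as_ bs alo ahi blo bhi).2.1 then
            pvPreRL as_ bs n alo (pvFLMAlt as_ bs alo ahi blo bhi).1 blo
              (pvFLMAlt as_ bs alo ahi blo bhi).2.1 else []).Perm
          (if alo < (pvFLMAlt as_ bs alo ahi blo bhi).1 ∧
            blo < (pvFLMAlt as_ bs alo ahi blo bhi).2.1 then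
            pvBlocksRec as_ bs n alo (pvFLMAlt as_ bs alo ahi blo bhi).1 blo
              (pvFLMAlt as_ bs alo ahi blo bhi).2.1 else []) := by
        split_ifs
        · exact ih _ _ _ _
        · exact List.Perm.refl _
      have hRp : (if (pvFLMAlt as_ bs alo ahi blo bhi).1 + (pvFLMAlt as_ bs alo ahi blo bhi).2.2 < ahi ∧
            (pvFLMAlt as_ bs alo ahi blo bhi).2.1 + (pvFLMAlt as_ bs alo ahi blo bhi).2.2 < bhi then
            pvPreRL as_ bs n
              ((pvFLMAlt as_ bs alo ahi blo bhi).1 + (pvFLMAlt as_ bs alo ahi blo bhi).2.2) ahi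
              ((pvFLMAlt as_ bs alo ahi blo bhi).2.1 + (pvFLMAlt as_ bs alo ahi blo bhi).2.2) bhi
            else []).Perm
          (if (pvFLMAlt as_ bs alo ahi blo bhi).1 + (pvFLMAlt as_ bs alo ahi blo bhi).2.2 < ahi ∧
            (pvFLMAlt as_ bs alo ahi blo bhi).2.1 + (pvFLMAlt as_ bs alo ahi blo bhi).2.2 < bhi then
            pvBlocksRec as_ bs n
              ((pvFLMAlt as_ bs alo ahi blo bhi).1 + (pvFLMAlt as_ bs alo ahi blo bhi).2.2) ahi
              ((pvFLMAlt as_ bs alo ahi blo bhi).2.1 + (pvFLMAlt as_ bs alo ahi blo bhi).2.2) bhi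
            else []) := by
        split_ifs
        · exact ih _ _ _ _
        · exact List.Perm.refl _
      have hmid := (List.Perm.trans List.perm_append_comm
        (List.Perm.append hLp hRp)).cons (pvFLMAlt as_ bs alo ahi blo bhi)
      refine hmid.trans ?_
      rw [List.append_assoc]
      exact List.perm_middle.symm
    · rw [if_neg hk, if_neg hk]

-- every emitted block lies strictly inside its window
theorem pvBlocksRec_bnd (as_ bs : List Char) : ∀ (n : Nat) (alo ahi blo bhi : Int),
    pvValid as_ bs alo ahi blo bhi →
    ∀ t ∈ pvBlocksRec as_ bs n alo ahi blo bhi,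
      alo ≤ t.1 ∧ t.1 + t.2.2 ≤ ahi ∧ blo ≤ t.2.1 ∧ t.2.1 + t.2.2 ≤ bhi ∧ 0 < t.2.2 := by
  intro n
  induction n with
  | zero => intro alo ahi blo bhi _ t ht; simp [pvBlocksRec] at ht
  | succ n ih =>
    intro alo ahi blo bhi hv t ht
    simp only [pvBlocksRec] at ht
    by_cases hk : (pvFLMAlt as_ bs alo ahi blo bhi).2.2 ≠ 0
    · obtain ⟨c1, c2, c3, c4, c5, cvL, cvR, cmL, cmR⟩ := pvChild_facts as_ bs alo ahi blo bhi hv hk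
      rw [if_pos hk] at ht
      rcases List.mem_append.1 ht with h1 | hR
      · rcases List.mem_append.1 h1 with hL | hx
        · split_ifs at hL with hg
          · have := ih alo (pvFLMAlt as_ bs alo ahi blo bhi).1 blo
              (pvFLMAlt as_ bs alo ahi blo bhi).2.1 cvL t hL
            omega
          · simp at hL
        · have hx' : t = pvFLMAlt as_ bs alo ahi blo bhi := List.mem_singleton.1 hx
          subst hx'; omega
      · split_ifs at hR with hg
        · have := ih ((pvFLMAlt as_ bs alo ahi blo bhi).1 + (pvFLMAlt as_ bs alo ahi blo bhi).2.2)
            ahi ((pvFLMAlt as_ bs alo ahi blo bhi).2.1 + (pvFLMAlt as_ bs alo ahi blo bhi).2.2)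
            bhi cvR t hR
          omega
        · simp at hR
    · rw [if_neg hk] at ht
      simp at ht

-- positivity of every block size at the top-level window
theorem pvBlocksRec_pos (a b : String) :
    ∀ t ∈ pvBlocksRec a.toList b.toList (a.length + b.length + 1)
        0 (a.length : Int) 0 (b.length : Int), 0 < t.2.2 := by
  intro t ht
  have hv : pvValid a.toList b.toList 0 (a.length : Int) 0 (b.length : Int) :=
    ⟨le_rfl, by positivity, by simp, le_rfl, by positivity, by simp⟩
  exact (pvBlocksRec_bnd a.toList b.toList _ _ _ _ _ hv t ht).2.2.2.2

-- lexicographic tuple order: basic facts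
theorem pvLexLt_asymm {x y : Int × Int × Int} (h : pvLexLt x y = true) :
    pvLexLt y x = false := by
  simp only [pvLexLt, Bool.or_eq_true, Bool.and_eq_true, decide_eq_true_eq, beq_iff_eq,
    Bool.or_eq_false_iff, Bool.and_eq_false_iff, decide_eq_false_iff_not, beq_eq_false_iff_ne] at *
  omega

theorem pvLexLt_trans {x y z : Int × Int × Int} (h1 : pvLexLt x y = true)
    (h2 : pvLexLt y z = true) : pvLexLt x z = true := by
  simp only [pvLexLt, Bool.or_eq_true, Bool.and_eq_true, decide_eq_true_eq, beq_iff_eq] at *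
  omega

theorem pvLexLt_of_fst {x y : Int × Int × Int} (h : x.1 < y.1) : pvLexLt x y = true := by
  simp only [pvLexLt, Bool.or_eq_true, Bool.and_eq_true, decide_eq_true_eq, beq_iff_eq]
  omega

-- insertion keeps the contents
theorem pvInsertBlk_perm (x : Int × Int × Int) : ∀ (l : List (Int × Int × Int)),
    (pvInsertBlk x l).Perm (x :: l) := by
  intro l
  induction l with
  | nil => simp [pvInsertBlk]
  | cons y ys ih =>
    simp only [pvInsertBlk]
    split_ifs
    · exact List.Perm.refl _
    · exact (ih.cons y).trans (List.Perm.swap x y ys)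

-- insertion keeps the list sorted (non-strictly, wrt "not greater")
theorem pvInsertBlk_sorted (x : Int × Int × Int) : ∀ (l : List (Int × Int × Int)),
    l.Pairwise (fun a b => pvLexLt b a = false) →
    (pvInsertBlk x l).Pairwise (fun a b => pvLexLt b a = false) := by
  intro l
  induction l with
  | nil => intro _; simp [pvInsertBlk]
  | cons y ys ih =>
    intro h
    rw [List.pairwise_cons] at h
    obtain ⟨hy, hys⟩ := h
    simp only [pvInsertBlk]
    split_ifs with hlt
    · rw [List.pairwise_cons]
      refine ⟨?_, List.pairwise_cons.2 ⟨hy, hys⟩⟩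
      intro z hz
      rcases List.mem_cons.1 hz with rfl | hz'
      · exact pvLexLt_asymm hlt
      · have hzy := hy z hz'
        by_cases hc : pvLexLt z x = true
        · have := pvLexLt_trans hc hlt
          rw [this] at hzy
          exact absurd hzy (by simp)
        · simp at hc; exact hc
    · rw [List.pairwise_cons]
      refine ⟨?_, ih hys⟩
      intro z hz
      have hz' := (pvInsertBlk_perm x ys).mem_iff.1 hz
      rcases List.mem_cons.1 hz' with rfl | hz''
      · simp at hlt; exact hlt
      · exact hy z hz''

-- the insertion sort: permutation and sortedness
theorem pvSortBlocks_spec : ∀ (l acc : List (Int × Int × Int)),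
    acc.Pairwise (fun a b => pvLexLt b a = false) →
    (l.foldl (fun acc x => pvInsertBlk x acc) acc).Perm (acc ++ l) ∧
    (l.foldl (fun acc x => pvInsertBlk x acc) acc).Pairwise (fun a b => pvLexLt b a = false) := by
  intro l
  induction l with
  | nil => intro acc hacc; simp [hacc]
  | cons x xs ih =>
    intro acc hacc
    simp only [List.foldl_cons]
    obtain ⟨hp, hs⟩ := ih (pvInsertBlk x acc) (pvInsertBlk_sorted x acc hacc)
    refine ⟨?_, hs⟩
    refine hp.trans ?_
    refine (List.Perm.append_right xs (pvInsertBlk_perm x acc)).trans ?_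
    exact List.perm_middle.symm

-- a sorted permutation of a strictly sorted list is that list
theorem pvSorted_unique : ∀ (l2 l1 : List (Int × Int × Int)), l1.Perm l2 →
    l1.Pairwise (fun a b => pvLexLt b a = false) →
    l2.Pairwise (fun a b => pvLexLt a b = true) → l1 = l2 := by
  intro l2
  induction l2 with
  | nil => intro l1 hp _ _; exact hp.eq_nil
  | cons y ys ih =>
    intro l1 hp hs1 hs2
    cases l1 with
    | nil => exact absurd hp.symm.eq_nil (by simp)
    | cons z zs =>
      rw [List.pairwise_cons] at hs1 hs2
      have hzy : z = y := by
        have hz : z ∈ y :: ys := hp.mem_iff.1 (List.mem_cons_self ..)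
        rcases List.mem_cons.1 hz with rfl | hz'
        · rfl
        · exfalso
          have h1 : pvLexLt y z = true := hs2.1 z hz'
          have hy : y ∈ z :: zs := hp.symm.mem_iff.1 (List.mem_cons_self ..)
          rcases List.mem_cons.1 hy with rfl | hy'
          · rw [pvLexLt_asymm h1] at h1; exact absurd h1 (by simp)
          · have := hs1.1 y hy'
            rw [h1] at this; exact absurd this (by simp)
      subst hzy
      have := ih zs (hp.cons_inv) hs1.2 hs2.2
      rw [this]

-- B's in-order list is strictly sorted on the a-side start index
theorem pvBlocksRec_sorted (as_ bs : List Char) : ∀ (n : Nat) (alo ahi blo bhi : Int),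
    pvValid as_ bs alo ahi blo bhi →
    (pvBlocksRec as_ bs n alo ahi blo bhi).Pairwise (fun x y => x.1 < y.1) := by
  intro n
  induction n with
  | zero => intro alo ahi blo bhi _; simp [pvBlocksRec]
  | succ n ih =>
    intro alo ahi blo bhi hv
    simp only [pvBlocksRec]
    by_cases hk : (pvFLMAlt as_ bs alo ahi blo bhi).2.2 ≠ 0
    · obtain ⟨c1, c2, c3, c4, c5, cvL, cvR, cmL, cmR⟩ := pvChild_facts as_ bs alo ahi blo bhi hv hk
      rw [if_pos hk, List.append_assoc, List.singleton_append]
      rw [List.pairwise_append]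
      refine ⟨?_, ?_, ?_⟩
      · split_ifs with hg
        · exact ih _ _ _ _ cvL
        · simp
      · rw [List.pairwise_cons]
        refine ⟨?_, ?_⟩
        · intro u hu
          split_ifs at hu with hg
          · have := pvBlocksRec_bnd as_ bs n _ _ _ _ cvR u hu
            omega
          · simp at hu
        · split_ifs with hg
          · exact ih _ _ _ _ cvR
          · simp
      · intro t ht u hu
        split_ifs at ht with hg
        · have hbt := pvBlocksRec_bnd as_ bs n _ _ _ _ cvL t ht
          rcases List.mem_cons.1 hu with rfl | hu'
          · omega
          · split_ifs at hu' with hg2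
            · have hbu := pvBlocksRec_bnd as_ bs n _ _ _ _ cvR u hu'
              omega
            · simp at hu'
        · simp at ht
    · rw [if_neg hk]; simp

-- the cost (an upper bound on queue pops) of a region
def pvCost (r : Int × Int × Int × Int) : Int :=
  2 * min (r.2.1 - r.1) (r.2.2.2 - r.2.2.1) + 1

theorem pvCost_ge_one (as_ bs : List Char) (r : Int × Int × Int × Int)
    (hv : pvValid as_ bs r.1 r.2.1 r.2.2.1 r.2.2.2) : 1 ≤ pvCost r := by
  obtain ⟨v1, v2, v3, v4, v5, v6⟩ := hv
  unfold pvCost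
  omega

theorem pvCostSum_lb (as_ bs : List Char) : ∀ (stack : List (Int × Int × Int × Int)),
    (∀ r ∈ stack, pvValid as_ bs r.1 r.2.1 r.2.2.1 r.2.2.2) →
    (stack.length : Int) ≤ (stack.map pvCost).sum := by
  intro stack
  induction stack with
  | nil => intro _; simp
  | cons r rest ih =>
    intro h
    have h1 := pvCost_ge_one as_ bs r (h r (List.mem_cons_self ..))
    have h2 := ih (fun t ht => h t (List.mem_cons_of_mem _ ht))
    simp only [List.map_cons, List.sum_cons, List.length_cons]
    push_cast
    omega

-- A's queue loop computes the concatenation of the per-region emission lists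
theorem pvQueue_eq (as_ bs : List Char) : ∀ (fuel : Nat) (stack : List (Int × Int × Int × Int))
    (acc : List (Int × Int × Int)),
    (∀ r ∈ stack, pvValid as_ bs r.1 r.2.1 r.2.2.1 r.2.2.2) →
    (stack.map pvCost).sum ≤ (fuel : Int) →
    pvQueueLoop as_ bs (pvB2J bs) fuel stack acc
      = acc ++ (stack.map (fun r =>
          pvPreRL as_ bs (pvMu r.1 r.2.1 r.2.2.1 r.2.2.2 + 1) r.1 r.2.1 r.2.2.1 r.2.2.2)).flatten := by
  intro fuel
  induction fuel with
  | zero =>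
    intro stack acc hv hsum
    cases stack with
    | nil => simp [pvQueueLoop]
    | cons r rest =>
      exfalso
      have := pvCostSum_lb as_ bs (r :: rest) hv
      simp at this hsum
      omega
  | succ f ih =>
    intro stack acc hv hsum
    cases stack with
    | nil => simp [pvQueueLoop]
    | cons r rest =>
      obtain ⟨alo, ahi, blo, bhi⟩ := r
      have hvr := hv _ (List.mem_cons_self ..)
      have hvrest : ∀ t ∈ rest, pvValid as_ bs t.1 t.2.1 t.2.2.1 t.2.2.2 :=
        fun t ht => hv t (List.mem_cons_of_mem _ ht)
      obtain ⟨v1, v2, v3, v4, v5, v6⟩ := hvr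
      have hbridge : pvFLM as_ bs (pvB2J bs) alo ahi blo bhi = pvFLMAlt as_ bs alo ahi blo bhi :=
        pvFLM_eq_alt as_ bs alo ahi blo bhi v4 v6
      simp only [pvQueueLoop, hbridge]
      have hc1 := pvCost_ge_one as_ bs (alo, ahi, blo, bhi) ⟨v1, v2, v3, v4, v5, v6⟩
      by_cases hk : (pvFLMAlt as_ bs alo ahi blo bhi).2.2 ≠ 0
      · obtain ⟨c1, c2, c3, c4, c5, cvL, cvR, cmL, cmR⟩ :=
          pvChild_facts as_ bs alo ahi blo bhi ⟨v1, v2, v3, v4, v5, v6⟩ hk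
        rw [if_pos hk]
        have costL : pvCost (alo, (pvFLMAlt as_ bs alo ahi blo bhi).1, blo,
            (pvFLMAlt as_ bs alo ahi blo bhi).2.1) + 1 +
            (pvCost ((pvFLMAlt as_ bs alo ahi blo bhi).1 + (pvFLMAlt as_ bs alo ahi blo bhi).2.2,
              ahi, (pvFLMAlt as_ bs alo ahi blo bhi).2.1 + (pvFLMAlt as_ bs alo ahi blo bhi).2.2,
              bhi) + 1)
            ≤ pvCost (alo, ahi, blo, bhi) + 1 := by
          unfold pvCost
          dsimp only
          omega
        by_cases hL : alo < (pvFLMAlt as_ bs alo ahi blo bhi).1 ∧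
            blo < (pvFLMAlt as_ bs alo ahi blo bhi).2.1 <;>
          by_cases hR : (pvFLMAlt as_ bs alo ahi blo bhi).1 + (pvFLMAlt as_ bs alo ahi blo bhi).2.2 < ahi ∧
              (pvFLMAlt as_ bs alo ahi blo bhi).2.1 + (pvFLMAlt as_ bs alo ahi blo bhi).2.2 < bhi
        · -- both children pushed
          rw [if_pos hL, if_pos hR]
          rw [ih _ _ (by
              intro t ht
              rcases List.mem_cons.1 ht with rfl | ht'
              · exact cvR
              rcases List.mem_cons.1 ht' with rfl | ht''
              · exact cvL
              · exact hvrest t ht'')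
            (by
              simp only [List.map_cons, List.sum_cons] at hsum ⊢
              push_cast at hsum ⊢
              unfold pvCost at hsum costL ⊢
              omega)]
          simp only [List.map_cons, List.flatten_cons]
          rw [pvPreRL_fuel as_ bs (pvMu ((pvFLMAlt as_ bs alo ahi blo bhi).1 + (pvFLMAlt as_ bs alo ahi blo bhi).2.2) ahi ((pvFLMAlt as_ bs alo ahi blo bhi).2.1 + (pvFLMAlt as_ bs alo ahi blo bhi).2.2) bhi)
              (pvMu ((pvFLMAlt as_ bs alo ahi blo bhi).1 + (pvFLMAlt as_ bs alo ahi blo bhi).2.2) ahi ((pvFLMAlt as_ bs alo ahi blo bhi).2.1 + (pvFLMAlt as_ bs alo ahi blo bhi).2.2) bhi + 1) (pvMu alo ahi blo bhi)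
              ((pvFLMAlt as_ bs alo ahi blo bhi).1 + (pvFLMAlt as_ bs alo ahi blo bhi).2.2) ahi ((pvFLMAlt as_ bs alo ahi blo bhi).2.1 + (pvFLMAlt as_ bs alo ahi blo bhi).2.2) bhi cvR rfl (by omega) (by omega),
            pvPreRL_fuel as_ bs (pvMu alo (pvFLMAlt as_ bs alo ahi blo bhi).1 blo (pvFLMAlt as_ bs alo ahi blo bhi).2.1)
              (pvMu alo (pvFLMAlt as_ bs alo ahi blo bhi).1 blo (pvFLMAlt as_ bs alo ahi blo bhi).2.1 + 1) (pvMu alo ahi blo bhi)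
              alo (pvFLMAlt as_ bs alo ahi blo bhi).1 blo (pvFLMAlt as_ bs alo ahi blo bhi).2.1 cvL rfl (by omega) (by omega)]
          simp only [pvPreRL]
          rw [if_pos hk, if_pos hL, if_pos hR]
          simp [List.append_assoc]
        · -- only left pushed
          rw [if_pos hL, if_neg hR]
          rw [ih _ _ (by
              intro t ht
              rcases List.mem_cons.1 ht with rfl | ht'
              · exact cvL
              · exact hvrest t ht')
            (by
              have hrw := hsum
              simp only [List.map_cons, List.sum_cons] at hrw ⊢
              unfold pvCost at hrw ⊢
              dsimp only at hrw ⊢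
              push_cast at hrw ⊢
              omega)]
          simp only [List.map_cons, List.flatten_cons]
          rw [pvPreRL_fuel as_ bs (pvMu alo (pvFLMAlt as_ bs alo ahi blo bhi).1 blo (pvFLMAlt as_ bs alo ahi blo bhi).2.1)
              (pvMu alo (pvFLMAlt as_ bs alo ahi blo bhi).1 blo (pvFLMAlt as_ bs alo ahi blo bhi).2.1 + 1) (pvMu alo ahi blo bhi)
              alo (pvFLMAlt as_ bs alo ahi blo bhi).1 blo (pvFLMAlt as_ bs alo ahi blo bhi).2.1 cvL rfl (by omega) (by omega)]
          simp only [pvPreRL]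
          rw [if_pos hk, if_pos hL, if_neg hR]
          simp [List.append_assoc]
        · -- only right pushed
          rw [if_neg hL, if_pos hR]
          rw [ih _ _ (by
              intro t ht
              rcases List.mem_cons.1 ht with rfl | ht'
              · exact cvR
              · exact hvrest t ht')
            (by
              have hrw := hsum
              simp only [List.map_cons, List.sum_cons] at hrw ⊢
              unfold pvCost at hrw ⊢
              dsimp only at hrw ⊢
              push_cast at hrw ⊢
              omega)]
          simp only [List.map_cons, List.flatten_cons]
          rw [pvPreRL_fuel as_ bs (pvMu ((pvFLMAlt as_ bs alo ahi blo bhi).1 + (pvFLMAlt as_ bs alo ahi blo bhi).2.2) ahi ((pvFLMAlt as_ bs alo ahi blo bhi).2.1 + (pvFLMAlt as_ bs alo ahi blo bhi).2.2) bhi)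
              (pvMu ((pvFLMAlt as_ bs alo ahi blo bhi).1 + (pvFLMAlt as_ bs alo ahi blo bhi).2.2) ahi ((pvFLMAlt as_ bs alo ahi blo bhi).2.1 + (pvFLMAlt as_ bs alo ahi blo bhi).2.2) bhi + 1) (pvMu alo ahi blo bhi)
              ((pvFLMAlt as_ bs alo ahi blo bhi).1 + (pvFLMAlt as_ bs alo ahi blo bhi).2.2) ahi ((pvFLMAlt as_ bs alo ahi blo bhi).2.1 + (pvFLMAlt as_ bs alo ahi blo bhi).2.2) bhi cvR rfl (by omega) (by omega)]
          simp only [pvPreRL]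
          rw [if_pos hk, if_neg hL, if_pos hR]
          simp [List.append_assoc]
        · -- no child pushed
          rw [if_neg hL, if_neg hR]
          rw [ih _ _ hvrest (by
              simp only [List.map_cons, List.sum_cons] at hsum
              omega)]
          simp only [List.map_cons, List.flatten_cons, pvPreRL]
          rw [if_pos hk, if_neg hL, if_neg hR]
          simp [List.append_assoc]
      · rw [if_neg hk]
        rw [ih _ _ hvrest (by
            simp only [List.map_cons, List.sum_cons] at hsum
            omega)]
        simp only [List.map_cons, List.flatten_cons, pvPreRL]
        rw [if_neg hk]
        simp

-- sorting A's queue output yields exactly B's in-order recursion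
theorem pvSort_queue_eq_inorder (a b : String) :
    pvSortBlocks (pvQueueLoop a.toList b.toList (pvB2J b.toList)
        (2 * min a.toList.length b.toList.length + 2)
        [(0, (a.toList.length : Int), 0, (b.toList.length : Int))] [])
      = pvBlocksRec a.toList b.toList (a.length + b.length + 1)
          0 (a.length : Int) 0 (b.length : Int) := by
  have hla : a.toList.length = a.length := by simp
  have hlb : b.toList.length = b.length := by simp
  rw [hla, hlb]
  have hvtop : pvValid a.toList b.toList 0 (a.length : Int) 0 (b.length : Int) :=
    ⟨le_rfl, by positivity, by rw [hla], le_rfl, by positivity, by rw [hlb]⟩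
  have hmu : pvMu 0 (a.length : Int) 0 (b.length : Int) = a.length + b.length := by
    unfold pvMu; omega
  have hq := pvQueue_eq a.toList b.toList (2 * min a.length b.length + 2)
    [(0, (a.length : Int), 0, (b.length : Int))] []
    (by intro r hr; rcases List.mem_singleton.1 hr with rfl; exact hvtop)
    (by
      simp only [List.map_cons, List.map_nil, List.sum_cons, List.sum_nil]
      unfold pvCost
      push_cast
      omega)
  rw [hq]
  simp only [List.map_cons, List.map_nil, List.flatten_cons, List.flatten_nil,
    List.append_nil, List.nil_append]
  have hfuel := pvBlocksRec_fuel a.toList b.toList (a.length + b.length)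
    (pvMu 0 (a.length : Int) 0 (b.length : Int) + 1) (a.length + b.length + 1)
    0 (a.length : Int) 0 (b.length : Int) hvtop hmu (by omega) (by omega)
  have hperm' : (pvPreRL a.toList b.toList (pvMu 0 (a.length : Int) 0 (b.length : Int) + 1)
      0 (a.length : Int) 0 (b.length : Int)).Perm
      (pvBlocksRec a.toList b.toList (a.length + b.length + 1)
        0 (a.length : Int) 0 (b.length : Int)) := by
    rw [← hfuel]
    exact pvPreRL_perm a.toList b.toList _ 0 (a.length : Int) 0 (b.length : Int)
  have hsorted : (pvBlocksRec a.toList b.toList (a.length + b.length + 1)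
      0 (a.length : Int) 0 (b.length : Int)).Pairwise (fun x y => pvLexLt x y = true) :=
    (pvBlocksRec_sorted a.toList b.toList _ _ _ _ _ hvtop).imp (fun h => pvLexLt_of_fst h)
  have hsort := pvSortBlocks_spec (pvPreRL a.toList b.toList
    (pvMu 0 (a.length : Int) 0 (b.length : Int) + 1) 0 (a.length : Int) 0 (b.length : Int))
    [] (by simp)
  unfold pvSortBlocks
  exact pvSorted_unique _ _ ((hsort.1.trans (by simp)).trans hperm') hsort.2 hsorted

-- the peek-at-last fold with a nonempty accumulator mirrors the pending-block recursion
theorem pvMergeFold_pending (rest : List (Int × Int × Int)) (hr : ∀ t ∈ rest, 0 < t.2.2) :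
    ∀ (front : List (Int × Int × Int)) (pend : Int × Int × Int), 0 < pend.2.2 →
      rest.foldl pvMergeStep (front ++ [pend]) = front ++ pvMergeAdj pend rest := by
  induction rest with
  | nil =>
    intro front pend hp
    obtain ⟨i1, j1, k1⟩ := pend
    simp only [List.foldl_nil, pvMergeAdj]
    have : k1 ≠ 0 := by simp at hp; omega
    simp [this]
  | cons y rest ih =>
    intro front pend hp
    have hy : 0 < y.2.2 := hr y (List.mem_cons_self ..)
    have hr' : ∀ t ∈ rest, 0 < t.2.2 := fun t ht => hr t (List.mem_cons_of_mem _ ht)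
    obtain ⟨i1, j1, k1⟩ := pend
    obtain ⟨i2, j2, k2⟩ := y
    simp only [List.foldl_cons, pvMergeAdj]
    have hstep : pvMergeStep (front ++ [(i1, j1, k1)]) (i2, j2, k2)
        = if i1 + k1 = i2 ∧ j1 + k1 = j2 then front ++ [(i1, j1, k1 + k2)]
          else (front ++ [(i1, j1, k1)]) ++ [(i2, j2, k2)] := by
      simp [pvMergeStep]
    rw [hstep]
    have hk1 : k1 ≠ 0 := by simp at hp; omega
    by_cases hadj : i1 + k1 = i2 ∧ j1 + k1 = j2
    · simp only [hadj, and_self, if_true]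
      exact ih hr' front (i1, j1, k1 + k2) (by simp at hp hy ⊢; omega)
    · simp only [hadj, if_false]
      rw [ih hr' (front ++ [(i1, j1, k1)]) (i2, j2, k2) hy]
      simp [hk1]

-- difflib's pending-block merge equals B's peek-at-last fold
theorem pvMergeAdj_eq_fold (l : List (Int × Int × Int)) (h : ∀ t ∈ l, 0 < t.2.2) :
    pvMergeAdj (0, 0, 0) l = l.foldl pvMergeStep [] := by
  cases l with
  | nil => simp [pvMergeAdj]
  | cons x rest =>
    have hx : 0 < x.2.2 := h x (List.mem_cons_self ..)
    have hr : ∀ t ∈ rest, 0 < t.2.2 := fun t ht => h t (List.mem_cons_of_mem _ ht)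
    obtain ⟨i2, j2, k2⟩ := x
    have hfirst : pvMergeStep [] (i2, j2, k2) = [(i2, j2, k2)] := by simp [pvMergeStep]
    rw [List.foldl_cons, hfirst]
    have hp := pvMergeFold_pending rest hr [] (i2, j2, k2) hx
    simp only [List.nil_append] at hp
    rw [hp]
    have hunfold : pvMergeAdj (0, 0, 0) ((i2, j2, k2) :: rest) = pvMergeAdj (i2, j2, k2) rest := by
      simp only [pvMergeAdj]
      by_cases hadj : (0 : Int) + 0 = i2 ∧ (0 : Int) + 0 = j2
      · obtain ⟨h1, h2⟩ := hadj
        simp [← h1, ← h2]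
      · simp only [hadj, if_false]
        simp
    rw [hunfold]

-- every block emitted by the merge pass has nonzero size
theorem pvMergeAdj_size_ne_zero (st : Int × Int × Int) (l : List (Int × Int × Int)) :
    ∀ t ∈ pvMergeAdj st l, t.2.2 ≠ 0 := by
  induction l generalizing st with
  | nil =>
    obtain ⟨i1, j1, k1⟩ := st
    intro t ht
    simp only [pvMergeAdj] at ht
    split at ht <;> simp_all
  | cons hd tl ih =>
    obtain ⟨i1, j1, k1⟩ := st
    obtain ⟨i2, j2, k2⟩ := hd
    intro t ht
    simp only [pvMergeAdj] at ht
    split at ht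
    · exact ih _ t ht
    · rcases List.mem_append.1 ht with h | h
      · split at h <;> simp_all
      · exact ih _ t h

-- slicing to exactly the length is slicing to the end
theorem pvSliceL_to_len {α : Type} (xs : List α) (p : Int) :
    PySem.List.slice xs (some p) (some (xs.length : Int)) = PySem.List.slice xs (some p) none := by
  simp only [PySem.List.slice, PySem.List.clampIdx]
  split_ifs <;> simp_all <;> omega

theorem pvSlice_to_len (s : String) (p : Int) :
    PySem.Str.slice s (some p) (some (s.length : Int)) = PySem.Str.slice s (some p) none := by
  have h := pvSliceL_to_len s.toList p
  simp only [PySem.Str.slice, PySem.Chars.slice]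
  simp_all

-- core: A's tag-dispatch fold over the opcodes of (blks ++ sentinel) equals the two
-- independent per-string reconstructions of B, from any cursors and accumulators
theorem pvWalk_eq (a b : String) (blks : List (Int × Int × Int))
    (hnz : ∀ t ∈ blks, t.2.2 ≠ 0) :
    ∀ (i j : Int) (accA accB : List (String × Bool)),
      (pvOpGen i j (blks ++ [((a.length : Int), (b.length : Int), 0)])).foldl
          (pvSegStep a b) (accA, accB)
        = ((let r := (blks.map fun t => (t.1, t.2.2)).foldl (pvAlongStep a) (accA, i);
            if r.2 < (a.length : Int)
            then r.1 ++ [(PySem.Str.slice a (some r.2) none, true)] else r.1),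
           (let r := (blks.map fun t => (t.2.1, t.2.2)).foldl (pvAlongStep b) (accB, j);
            if r.2 < (b.length : Int)
            then r.1 ++ [(PySem.Str.slice b (some r.2) none, true)] else r.1)) := by
  induction blks with
  | nil =>
    intro i j accA accB
    simp only [List.nil_append, pvOpGen, List.map_nil, List.foldl_nil]
    by_cases ha : i < (a.length : Int) <;> by_cases hb : j < (b.length : Int) <;>
      simp [pvSegStep, ha, hb, pvSlice_to_len]
  | cons blk rest ih =>
    intro i j accA accB
    obtain ⟨ai, bj, size⟩ := blk
    have hsz : size ≠ 0 := hnz (ai, bj, size) (List.mem_cons_self ..)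
    have ih' := ih (fun t ht => hnz t (List.mem_cons_of_mem _ ht))
    simp only [List.cons_append, pvOpGen, List.foldl_append, List.map_cons, List.foldl_cons,
      pvAlongStep]
    by_cases ha : i < ai <;> by_cases hb : j < bj <;>
      simp [pvSegStep, ha, hb, hsz, ih']

-- ===== VERDICT (by name: the statement is the Claim_ definition above) =====
theorem diff_segments_py_spec : Claim_equal_diff_segments_py := by
  intro a b _
  unfold Spec_diff_segments_py diff_segments_py diff_segments_py_alt
  have hblocks : pvBlocks a b
      = pvMergeAdj (0, 0, 0) (pvSortBlocks (pvQueueLoop a.toList b.toList (pvB2J b.toList)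
          (2 * min a.toList.length b.toList.length + 2)
          [(0, (a.toList.length : Int), 0, (b.toList.length : Int))] []))
        ++ [((a.length : Int), (b.length : Int), 0)] := by
    simp [pvBlocks]
  have hmerged : pvMergeAdj (0, 0, 0) (pvSortBlocks (pvQueueLoop a.toList b.toList (pvB2J b.toList)
          (2 * min a.toList.length b.toList.length + 2)
          [(0, (a.toList.length : Int), 0, (b.toList.length : Int))] []))
      = pvMergedBlocks a b := by
    rw [pvSort_queue_eq_inorder, pvMergedBlocks,
      pvMergeAdj_eq_fold _ (pvBlocksRec_pos a b)]
  have hnz : ∀ t ∈ pvMergedBlocks a b, t.2.2 ≠ 0 := by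
    intro t ht
    rw [← hmerged] at ht
    exact pvMergeAdj_size_ne_zero _ _ t ht
  rw [hblocks, hmerged]
  exact pvWalk_eq a b (pvMergedBlocks a b) hnz 0 0 [] []
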